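-- pv_equiv track=rewrite | github.com/Gracie-Guan/portfolio-virtual-chat | backend/rag_pipeline.py | normalize_question
-- ===== SOURCE A (Python) =====
-- def normalize_question(q: str) -> str:
--     replacements = {
--         "ux": "UX",
--         "ai": "AI",
--         "cv": "CV",
--         "llm": "LLM"
--     }
--     for k, v in replacements.items():
--         q = q.replace(k, v)
--     return q
-- ===== SOURCE B (Python) =====
-- ACRONYMS = (("ux", "UX"), ("ai", "AI"), ("cv", "CV"), ("llm", "LLM"))
--
-- def normalize_question(q: str) -> str:
--     # single left-to-right scan instead of four sequential .replace passes
--     out = []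
--     i = 0
--     n = len(q)
--     while i < n:
--         for key, upper in ACRONYMS:
--             if q.startswith(key, i):
--                 out.append(upper)
--                 i += len(key)
--                 break
--         else:
--             out.append(q[i])
--             i += 1
--     return "".join(out)
-- ===== Notes on version B (the rewrite author's own statement) =====
-- stated objective: alternative
-- what changed: B makes a single left-to-right scan of the string, matching the four acronym keys at each position and emitting the uppercase form, instead of A's four sequential full-string .replace passes.
import Mathlib
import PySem

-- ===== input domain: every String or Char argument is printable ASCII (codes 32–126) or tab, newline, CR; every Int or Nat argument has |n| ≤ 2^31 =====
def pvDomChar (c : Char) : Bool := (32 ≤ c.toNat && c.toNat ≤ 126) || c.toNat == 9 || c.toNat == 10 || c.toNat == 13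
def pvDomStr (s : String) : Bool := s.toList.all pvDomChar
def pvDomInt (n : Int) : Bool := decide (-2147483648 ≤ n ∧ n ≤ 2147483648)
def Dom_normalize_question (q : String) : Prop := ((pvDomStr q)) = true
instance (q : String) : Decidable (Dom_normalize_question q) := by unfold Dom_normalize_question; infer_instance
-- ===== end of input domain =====

-- B replaces A's four sequential str.replace passes by one left-to-right scan over the string (alternative decomposition, same result).


-- ===== PORT A =====
-- four sequential replaces, in the dict's insertion order
def normalize_question (q : String) : String :=
  PySem.Str.replace
    (PySem.Str.replace
      (PySem.Str.replace
        (PySem.Str.replace q "ux" "UX")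
        "ai" "AI")
      "cv" "CV")
    "llm" "LLM"

-- ===== PORT B =====
-- single left-to-right scan: at each position try the keys in order (ux, ai, cv, llm);
-- on a match emit the uppercase form and skip the key, else emit the char
def pvScan : List Char → List Char
  | [] => []
  | c :: t =>
    if ['u','x'].isPrefixOf (c :: t) then 'U' :: 'X' :: pvScan (t.drop 1)
    else if ['a','i'].isPrefixOf (c :: t) then 'A' :: 'I' :: pvScan (t.drop 1)
    else if ['c','v'].isPrefixOf (c :: t) then 'C' :: 'V' :: pvScan (t.drop 1)
    else if ['l','l','m'].isPrefixOf (c :: t) then 'L' :: 'L' :: 'M' :: pvScan (t.drop 2)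
    else c :: pvScan t
termination_by l => l.length
decreasing_by all_goals (simp; try omega)

def normalize_question_alt (q : String) : String := String.ofList (pvScan q.toList)

-- ===== PRECONDITION & SPEC =====
def Spec_normalize_question (q : String) (out : String) : Prop := out = normalize_question_alt q
instance (q : String) (out : String) : Decidable (Spec_normalize_question q out) := by unfold Spec_normalize_question; infer_instance

-- ===== CLAIM (what is proved, stated in full; the proofs are below) =====
def Claim_equal_normalize_question : Prop := ∀ (q : String), Dom_normalize_question q → Spec_normalize_question q (normalize_question q)

-- ===== LEMMAS AND PROOFS =====

-- structural form of PySem.Chars.replace for a nonempty pattern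
def pvRepl (o0 : Char) (orest new : List Char) : List Char → List Char
  | [] => []
  | c :: t =>
    if (o0 :: orest).isPrefixOf (c :: t) then new ++ pvRepl o0 orest new (t.drop orest.length)
    else c :: pvRepl o0 orest new t
termination_by l => l.length
decreasing_by all_goals (simp; try omega)

lemma pvRepl_go_spec (o0 : Char) (orest new : List Char) :
    ∀ (fuel : Nat) (l acc : List Char), l.length ≤ fuel →
      PySem.Chars.replace.go (o0 :: orest) new fuel l acc = acc.reverse ++ pvRepl o0 orest new l := by
  intro fuel
  induction fuel with
  | zero =>
    intro l acc h
    have : l = [] := by cases l <;> simp_all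
    subst this
    simp [PySem.Chars.replace.go, pvRepl]
  | succ n ih =>
    intro l acc h
    cases l with
    | nil => simp [PySem.Chars.replace.go, pvRepl]
    | cons c t =>
      by_cases hp : (o0 :: orest).isPrefixOf (c :: t)
      · have hdrop : (t.drop orest.length).length ≤ n := by
          simp at h ⊢; omega
        simp only [PySem.Chars.replace.go, hp, if_pos, List.length_cons, List.drop_succ_cons]
        rw [ih _ _ hdrop]
        simp [pvRepl, hp]
      · simp only [PySem.Chars.replace.go, hp]
        rw [ih t (c :: acc) (by simp at h ⊢; omega)]
        simp [pvRepl, hp]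

lemma replace_eq_pvRepl (o0 : Char) (orest new l : List Char) :
    PySem.Chars.replace l (o0 :: orest) new = pvRepl o0 orest new l := by
  simp [PySem.Chars.replace, pvRepl_go_spec o0 orest new l.length l [] le_rfl]

lemma pvRepl_cons_ne (o0 : Char) (orest new : List Char) (c : Char) (t : List Char)
    (h : c ≠ o0) : pvRepl o0 orest new (c :: t) = c :: pvRepl o0 orest new t := by
  rw [pvRepl]
  simp [List.isPrefixOf, Ne.symm h]

lemma pvRepl_cons_prefix (o0 : Char) (orest new : List Char) (c : Char) (t : List Char)
    (h : (o0 :: orest).isPrefixOf (c :: t)) :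
    pvRepl o0 orest new (c :: t) = new ++ pvRepl o0 orest new (t.drop orest.length) := by
  rw [pvRepl]; simp [h]

lemma pvRepl_cons_not_prefix (o0 : Char) (orest new : List Char) (c : Char) (t : List Char)
    (h : ¬ (o0 :: orest).isPrefixOf (c :: t)) :
    pvRepl o0 orest new (c :: t) = c :: pvRepl o0 orest new t := by
  rw [pvRepl]; simp [h]

-- the head of pvRepl's output is the head of the input or the head of `new`
lemma pvRepl_head (o0 : Char) (orest new l : List Char) (hn : new ≠ []) :
    (pvRepl o0 orest new l).head? = l.head? ∨ (pvRepl o0 orest new l).head? = new.head? := by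
  cases l with
  | nil => left; rw [pvRepl]
  | cons c t =>
    by_cases hp : (o0 :: orest).isPrefixOf (c :: t)
    · right
      rw [pvRepl_cons_prefix _ _ _ _ _ hp]
      cases new <;> simp_all
    · left
      rw [pvRepl_cons_not_prefix _ _ _ _ _ hp]
      rfl

-- abbreviations for the four replaces
def pvR1 : List Char → List Char := pvRepl 'u' ['x'] ['U','X']
def pvR2 : List Char → List Char := pvRepl 'a' ['i'] ['A','I']
def pvR3 : List Char → List Char := pvRepl 'c' ['v'] ['C','V']
def pvR4 : List Char → List Char := pvRepl 'l' ['l','m'] ['L','L','M']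

lemma singleton_isPrefixOf_iff (a : Char) (X : List Char) :
    [a].isPrefixOf X = true ↔ X.head? = some a := by
  cases X with
  | nil => simp [List.isPrefixOf]
  | cons y Y => simp [List.isPrefixOf]; exact eq_comm

lemma cons_isPrefixOf_cons_iff (a c : Char) (r X : List Char) :
    (a :: r).isPrefixOf (c :: X) = true ↔ a = c ∧ r.isPrefixOf X = true := by
  simp [List.isPrefixOf]

lemma pair_isPrefixOf_cons_iff (a b c : Char) (X : List Char) :
    [a, b].isPrefixOf (c :: X) = true ↔ a = c ∧ X.head? = some b := by
  rw [cons_isPrefixOf_cons_iff, singleton_isPrefixOf_iff]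

lemma cons_isPrefixOf_head (a : Char) (r X : List Char)
    (h : (a :: r).isPrefixOf X = true) : X.head? = some a := by
  cases X with
  | nil => simp [List.isPrefixOf] at h
  | cons y Y => rw [cons_isPrefixOf_cons_iff] at h; simp [h.1]

-- cons-step lemmas for each of the four replaces
lemma pvR1_cons_ne (c : Char) (t : List Char) (h : c ≠ 'u') : pvR1 (c :: t) = c :: pvR1 t :=
  pvRepl_cons_ne _ _ _ _ _ h
lemma pvR2_cons_ne (c : Char) (t : List Char) (h : c ≠ 'a') : pvR2 (c :: t) = c :: pvR2 t :=
  pvRepl_cons_ne _ _ _ _ _ h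
lemma pvR3_cons_ne (c : Char) (t : List Char) (h : c ≠ 'c') : pvR3 (c :: t) = c :: pvR3 t :=
  pvRepl_cons_ne _ _ _ _ _ h
lemma pvR4_cons_ne (c : Char) (t : List Char) (h : c ≠ 'l') : pvR4 (c :: t) = c :: pvR4 t :=
  pvRepl_cons_ne _ _ _ _ _ h

lemma pvR1_cons_nomatch (c : Char) (t : List Char) (h : ¬ ['u','x'].isPrefixOf (c :: t) = true) :
    pvR1 (c :: t) = c :: pvR1 t := pvRepl_cons_not_prefix _ _ _ _ _ h
lemma pvR2_cons_nomatch (c : Char) (t : List Char) (h : ¬ ['a','i'].isPrefixOf (c :: t) = true) :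
    pvR2 (c :: t) = c :: pvR2 t := pvRepl_cons_not_prefix _ _ _ _ _ h
lemma pvR3_cons_nomatch (c : Char) (t : List Char) (h : ¬ ['c','v'].isPrefixOf (c :: t) = true) :
    pvR3 (c :: t) = c :: pvR3 t := pvRepl_cons_not_prefix _ _ _ _ _ h
lemma pvR4_cons_nomatch (c : Char) (t : List Char) (h : ¬ ['l','l','m'].isPrefixOf (c :: t) = true) :
    pvR4 (c :: t) = c :: pvR4 t := pvRepl_cons_not_prefix _ _ _ _ _ h

lemma pvR1_cons_match (t : List Char) : pvR1 ('u' :: 'x' :: t) = 'U' :: 'X' :: pvR1 t := by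
  rw [show pvR1 ('u' :: 'x' :: t)
        = ['U','X'] ++ pvRepl 'u' ['x'] ['U','X'] (('x' :: t).drop ['x'].length)
      from pvRepl_cons_prefix _ _ _ _ _ (by simp [List.isPrefixOf])]
  rfl
lemma pvR2_cons_match (t : List Char) : pvR2 ('a' :: 'i' :: t) = 'A' :: 'I' :: pvR2 t := by
  rw [show pvR2 ('a' :: 'i' :: t)
        = ['A','I'] ++ pvRepl 'a' ['i'] ['A','I'] (('i' :: t).drop ['i'].length)
      from pvRepl_cons_prefix _ _ _ _ _ (by simp [List.isPrefixOf])]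
  rfl
lemma pvR3_cons_match (t : List Char) : pvR3 ('c' :: 'v' :: t) = 'C' :: 'V' :: pvR3 t := by
  rw [show pvR3 ('c' :: 'v' :: t)
        = ['C','V'] ++ pvRepl 'c' ['v'] ['C','V'] (('v' :: t).drop ['v'].length)
      from pvRepl_cons_prefix _ _ _ _ _ (by simp [List.isPrefixOf])]
  rfl
lemma pvR4_cons_match (t : List Char) : pvR4 ('l' :: 'l' :: 'm' :: t) = 'L' :: 'L' :: 'M' :: pvR4 t := by
  rw [show pvR4 ('l' :: 'l' :: 'm' :: t)
        = ['L','L','M'] ++ pvRepl 'l' ['l','m'] ['L','L','M'] (('l' :: 'm' :: t).drop ['l','m'].length)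
      from pvRepl_cons_prefix _ _ _ _ _ (by simp [List.isPrefixOf])]
  rfl

lemma pvR1_nil : pvR1 [] = [] := by rw [pvR1, pvRepl]
lemma pvR2_nil : pvR2 [] = [] := by rw [pvR2, pvRepl]
lemma pvR3_nil : pvR3 [] = [] := by rw [pvR3, pvRepl]
lemma pvR4_nil : pvR4 [] = [] := by rw [pvR4, pvRepl]

-- heads through the first three replaces
lemma pvR1_head (t : List Char) : (pvR1 t).head? = t.head? ∨ (pvR1 t).head? = some 'U' := by
  simpa using pvRepl_head 'u' ['x'] ['U','X'] t (by simp)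
lemma pvR2_head (t : List Char) : (pvR2 t).head? = t.head? ∨ (pvR2 t).head? = some 'A' := by
  simpa using pvRepl_head 'a' ['i'] ['A','I'] t (by simp)
lemma pvR3_head (t : List Char) : (pvR3 t).head? = t.head? ∨ (pvR3 t).head? = some 'C' := by
  simpa using pvRepl_head 'c' ['v'] ['C','V'] t (by simp)

lemma chain3_head (t : List Char) (a : Char) (h : (pvR3 (pvR2 (pvR1 t))).head? = some a) :
    a = 'U' ∨ a = 'A' ∨ a = 'C' ∨ t.head? = some a := by
  rcases pvR3_head (pvR2 (pvR1 t)) with h3 | h3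
  · rcases pvR2_head (pvR1 t) with h2 | h2
    · rcases pvR1_head t with h1 | h1
      · exact Or.inr (Or.inr (Or.inr (by rw [← h1, ← h2, ← h3, h])))
      · exact Or.inl (by rw [h3, h2, h1] at h; exact (Option.some_inj.mp h).symm)
    · exact Or.inr (Or.inl (by rw [h3, h2] at h; exact (Option.some_inj.mp h).symm))
  · exact Or.inr (Or.inr (Or.inl (by rw [h3] at h; exact (Option.some_inj.mp h).symm)))

-- step the whole chain over one unmatched character
lemma chain_step (c : Char) (t : List Char)
    (h1 : ¬ ['u','x'].isPrefixOf (c :: t) = true)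
    (h2 : ¬ ['a','i'].isPrefixOf (c :: t) = true)
    (h3 : ¬ ['c','v'].isPrefixOf (c :: t) = true)
    (h4 : ¬ ['l','l','m'].isPrefixOf (c :: t) = true) :
    pvR4 (pvR3 (pvR2 (pvR1 (c :: t)))) = c :: pvR4 (pvR3 (pvR2 (pvR1 t))) := by
  have e1 : pvR1 (c :: t) = c :: pvR1 t := pvR1_cons_nomatch _ _ h1
  have e2 : pvR2 (c :: pvR1 t) = c :: pvR2 (pvR1 t) := by
    apply pvR2_cons_nomatch
    rw [pair_isPrefixOf_cons_iff]
    rintro ⟨rfl, hh⟩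
    rcases pvR1_head t with h' | h'
    · rw [pair_isPrefixOf_cons_iff] at h2
      exact h2 ⟨rfl, h' ▸ hh⟩
    · rw [h'] at hh; simp at hh
  have e3 : pvR3 (c :: pvR2 (pvR1 t)) = c :: pvR3 (pvR2 (pvR1 t)) := by
    apply pvR3_cons_nomatch
    rw [pair_isPrefixOf_cons_iff]
    rintro ⟨rfl, hh⟩
    rcases pvR2_head (pvR1 t) with h' | h'
    · rcases pvR1_head t with h'' | h''
      · rw [pair_isPrefixOf_cons_iff] at h3
        exact h3 ⟨rfl, h'' ▸ h' ▸ hh⟩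
      · rw [h', h''] at hh; simp at hh
    · rw [h'] at hh; simp at hh
  have e4 : pvR4 (c :: pvR3 (pvR2 (pvR1 t))) = c :: pvR4 (pvR3 (pvR2 (pvR1 t))) := by
    apply pvR4_cons_nomatch
    intro hh
    rw [cons_isPrefixOf_cons_iff] at hh
    obtain ⟨hc, hrest⟩ := hh
    subst hc
    cases t with
    | nil => rw [pvR1_nil, pvR2_nil, pvR3_nil] at hrest; simp [List.isPrefixOf] at hrest
    | cons d t2 =>
      by_cases hd : d = 'l'
      · subst hd
        have s1 : pvR1 ('l' :: t2) = 'l' :: pvR1 t2 := pvR1_cons_ne _ _ (by decide)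
        have s2 : pvR2 ('l' :: pvR1 t2) = 'l' :: pvR2 (pvR1 t2) := pvR2_cons_ne _ _ (by decide)
        have s3 : pvR3 ('l' :: pvR2 (pvR1 t2)) = 'l' :: pvR3 (pvR2 (pvR1 t2)) := pvR3_cons_ne _ _ (by decide)
        rw [s1, s2, s3, pair_isPrefixOf_cons_iff] at hrest
        have hm := chain3_head t2 'm' hrest.2
        rcases hm with h' | h' | h' | h' <;> (try simp at h')
        apply h4
        rw [cons_isPrefixOf_cons_iff]
        refine ⟨rfl, ?_⟩
        rw [cons_isPrefixOf_cons_iff]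
        exact ⟨rfl, (singleton_isPrefixOf_iff _ _).mpr h'⟩
      · have hhead := cons_isPrefixOf_head 'l' ['m'] _ hrest
        have := chain3_head (d :: t2) 'l' hhead
        rcases this with h' | h' | h' | h' <;> simp_all
  rw [e1, e2, e3, e4]

lemma pvChain_eq_scan (l : List Char) : pvR4 (pvR3 (pvR2 (pvR1 l))) = pvScan l := by
  fun_induction pvScan l
  case case1 => rw [pvR1_nil, pvR2_nil, pvR3_nil, pvR4_nil]
  case case2 c t hp ih =>
    obtain ⟨rfl, ht⟩ := (pair_isPrefixOf_cons_iff _ _ _ _).mp hp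
    cases t with
    | nil => simp at ht
    | cons x t2 =>
      simp at ht; subst ht
      rw [pvR1_cons_match, pvR2_cons_ne _ _ (by decide), pvR2_cons_ne _ _ (by decide),
          pvR3_cons_ne _ _ (by decide), pvR3_cons_ne _ _ (by decide),
          pvR4_cons_ne _ _ (by decide), pvR4_cons_ne _ _ (by decide)]
      simpa using ih
  case case3 c t h1 hp ih =>
    obtain ⟨rfl, ht⟩ := (pair_isPrefixOf_cons_iff _ _ _ _).mp hp
    cases t with
    | nil => simp at ht
    | cons x t2 =>
      simp at ht; subst ht
      rw [pvR1_cons_ne _ _ (by decide), pvR1_cons_ne _ _ (by decide), pvR2_cons_match,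
          pvR3_cons_ne _ _ (by decide), pvR3_cons_ne _ _ (by decide),
          pvR4_cons_ne _ _ (by decide), pvR4_cons_ne _ _ (by decide)]
      simpa using ih
  case case4 c t h1 h2 hp ih =>
    obtain ⟨rfl, ht⟩ := (pair_isPrefixOf_cons_iff _ _ _ _).mp hp
    cases t with
    | nil => simp at ht
    | cons x t2 =>
      simp at ht; subst ht
      rw [pvR1_cons_ne _ _ (by decide), pvR1_cons_ne _ _ (by decide),
          pvR2_cons_ne _ _ (by decide), pvR2_cons_ne _ _ (by decide), pvR3_cons_match,
          pvR4_cons_ne _ _ (by decide), pvR4_cons_ne _ _ (by decide)]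
      simpa using ih
  case case5 c t h1 h2 h3 hp ih =>
    have hc := cons_isPrefixOf_head 'l' ['l','m'] _ hp
    simp at hc
    subst hc
    cases t with
    | nil => simp [List.isPrefixOf] at hp
    | cons x t2 =>
      rw [cons_isPrefixOf_cons_iff] at hp
      obtain ⟨-, hp⟩ := hp
      cases t2 with
      | nil => simp [List.isPrefixOf] at hp
      | cons m t3 =>
        rw [cons_isPrefixOf_cons_iff, singleton_isPrefixOf_iff] at hp
        obtain ⟨hx, hm⟩ := hp
        subst hx
        simp at hm
        subst hm
        rw [pvR1_cons_ne _ _ (by decide), pvR1_cons_ne _ _ (by decide), pvR1_cons_ne _ _ (by decide),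
            pvR2_cons_ne _ _ (by decide), pvR2_cons_ne _ _ (by decide), pvR2_cons_ne _ _ (by decide),
            pvR3_cons_ne _ _ (by decide), pvR3_cons_ne _ _ (by decide), pvR3_cons_ne _ _ (by decide),
            pvR4_cons_match]
        simpa using ih
  case case6 c t h1 h2 h3 h4 ih =>
    rw [chain_step c t h1 h2 h3 h4, ih]

theorem normalize_question_spec : Claim_equal_normalize_question := by
  intro q _
  unfold Spec_normalize_question normalize_question normalize_question_alt
  apply String.toList_inj.mp
  simp only [PySem.Str.toList_replace]
  have hux : ("ux" : String).toList = ['u','x'] := by decide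
  have hUX : ("UX" : String).toList = ['U','X'] := by decide
  have hai : ("ai" : String).toList = ['a','i'] := by decide
  have hAI : ("AI" : String).toList = ['A','I'] := by decide
  have hcv : ("cv" : String).toList = ['c','v'] := by decide
  have hCV : ("CV" : String).toList = ['C','V'] := by decide
  have hllm : ("llm" : String).toList = ['l','l','m'] := by decide
  have hLLM : ("LLM" : String).toList = ['L','L','M'] := by decide
  rw [hux, hUX, hai, hAI, hcv, hCV, hllm, hLLM,
      replace_eq_pvRepl, replace_eq_pvRepl, replace_eq_pvRepl, replace_eq_pvRepl]
  have h := pvChain_eq_scan q.toList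
  unfold pvR1 pvR2 pvR3 pvR4 at h
  rw [h]
  exact String.toList_ofList.symm
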